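-- pv_equiv track=rewrite | github.com/multiplylabs/g1pilot | g1pilot/navigation/dijkstra_planner.py | inflate_occupancy
-- ===== SOURCE A (Python) =====
-- def inflate_occupancy(occ,w,h,r_cells,occ_th):
--     if r_cells<=0: return occ[:]
--     inflated=[0]*(w*h)
--     occ_cells=[(i%w,i//w) for i,v in enumerate(occ) if v>=occ_th and v!=255]
--     for ox,oy in occ_cells:
--         xmin=max(0,ox-r_cells); xmax=min(w-1,ox+r_cells)
--         ymin=max(0,oy-r_cells); ymax=min(h-1,oy+r_cells)
--         r2=r_cells*r_cells
--         for y in range(ymin,ymax+1):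
--             dy=y-oy; dy2=dy*dy
--             base=y*w
--             for x in range(xmin,xmax+1):
--                 dx=x-ox
--                 if dx*dx+dy2<=r2:
--                     inflated[base+x]=max(inflated[base+x],100)
--     for i,v in enumerate(occ):
--         if v==255: inflated[i]=255
--     return inflated
-- ===== SOURCE B (Python) =====
-- def inflate_occupancy(occ, w, h, r_cells, occ_th):
--     # Gather formulation: one comprehension over the output grid; each cell decides
--     # its own value (255 overlay, else 100 if any occupied source lies within r_cells).
--     if r_cells <= 0:
--         return occ[:]
--     r2 = r_cells * r_cells
--     srcs = [(i % w, i // w) for i, v in enumerate(occ) if v >= occ_th and v != 255]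
--     return [255 if i < len(occ) and occ[i] == 255 else
--             (100 if any((i % w - ox) ** 2 + (i // w - oy) ** 2 <= r2 for ox, oy in srcs) else 0)
--             for i in range(w * h)]
-- ===== Notes on version B (the rewrite author's own statement) =====
-- stated objective: alternative
-- what changed: A scatters: for every occupied source it scans a clamped (2r+1)^2 box and writes 100 into the disk; B gathers: a single comprehension over the output grid decides each cell's value directly (255 overlay, else 100 iff some source is within Euclidean distance r).
-- outside the precondition, e.g. on inflate_occupancy([100], -1, -1, 1, 1): A returns [0], B returns [100]
import Mathlib
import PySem

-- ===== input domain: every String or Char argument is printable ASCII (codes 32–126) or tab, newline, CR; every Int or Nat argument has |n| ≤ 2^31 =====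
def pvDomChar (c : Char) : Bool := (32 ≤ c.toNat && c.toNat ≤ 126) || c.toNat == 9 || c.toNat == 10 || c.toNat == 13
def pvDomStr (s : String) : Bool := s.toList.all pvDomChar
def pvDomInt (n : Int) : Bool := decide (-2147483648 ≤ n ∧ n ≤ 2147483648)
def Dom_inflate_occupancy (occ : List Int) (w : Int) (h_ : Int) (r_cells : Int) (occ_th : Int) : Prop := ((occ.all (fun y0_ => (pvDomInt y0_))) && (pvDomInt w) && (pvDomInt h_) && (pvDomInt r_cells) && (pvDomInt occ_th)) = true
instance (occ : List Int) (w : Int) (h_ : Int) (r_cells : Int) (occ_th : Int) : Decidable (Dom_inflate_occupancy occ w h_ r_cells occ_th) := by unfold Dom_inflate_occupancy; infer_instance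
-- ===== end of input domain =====

-- B replaces A's per-source scatter over a clamped box by a single gather pass over the
-- output grid (each cell decides its own value); equivalence of the RETURN value is proved
-- on Pre_ (A raises or the grid has a negative width outside it).

-- ===== PORT A =====
def inflate_occupancy (occ : List Int) (w : Int) (h_ : Int) (r_cells : Int) (occ_th : Int) : List Int :=
  if r_cells ≤ 0 then occ
  else
    let inflated0 : List Int := List.replicate (w * h_).toNat 0
    let occ_cells : List (Int × Int) :=
      ((PySem.List.enumerate occ 0).filter
          (fun iv => decide (occ_th ≤ iv.2) && decide (iv.2 ≠ 255))).map
        (fun iv => (PySem.Int.mod iv.1 w, PySem.Int.floordiv iv.1 w))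
    let inflated1 := occ_cells.foldl (fun infl oc =>
      let ox := oc.1
      let oy := oc.2
      let xmin := max 0 (ox - r_cells)
      let xmax := min (w - 1) (ox + r_cells)
      let ymin := max 0 (oy - r_cells)
      let ymax := min (h_ - 1) (oy + r_cells)
      let r2 := r_cells * r_cells
      (PySem.List.pyRange ymin (ymax + 1) 1).foldl (fun infl y =>
        let dy := y - oy
        let dy2 := dy * dy
        let base := y * w
        (PySem.List.pyRange xmin (xmax + 1) 1).foldl (fun infl x =>
          let dx := x - ox
          if dx * dx + dy2 ≤ r2 then
            PySem.List.pySetD infl (base + x) (max (PySem.List.pyGetD infl (base + x) 0) 100)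
          else infl) infl) infl) inflated0
    (PySem.List.enumerate occ 0).foldl (fun infl iv =>
      if iv.2 = 255 then PySem.List.pySetD infl iv.1 255 else infl) inflated1

-- ===== PORT B =====
def inflate_occupancy_alt (occ : List Int) (w : Int) (h_ : Int) (r_cells : Int) (occ_th : Int) : List Int :=
  if r_cells ≤ 0 then occ
  else
    let r2 := r_cells * r_cells
    let srcs : List (Int × Int) :=
      ((PySem.List.enumerate occ 0).filter
          (fun iv => decide (occ_th ≤ iv.2) && decide (iv.2 ≠ 255))).map
        (fun iv => (PySem.Int.mod iv.1 w, PySem.Int.floordiv iv.1 w))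
    (PySem.List.pyRange 0 (w * h_) 1).map (fun i =>
      if (i < (occ.length : Int) ∧ PySem.List.pyGet? occ i = some 255) then (255 : Int)
      else if srcs.any (fun s =>
          (PySem.Int.mod i w - s.1) ^ 2 + (PySem.Int.floordiv i w - s.2) ^ 2 ≤ r2) then 100
      else 0)

-- ===== PRECONDITION & SPEC =====
-- Pre_ excludes exactly the inputs where the Python A raises (IndexError on a 255 cell beyond
-- the w*h grid, ZeroDivisionError on w = 0 with an occupied cell) and, for r_cells > 0, the
-- negative widths w < 0 (a malformed grid outside the task's natural domain, on which A's
-- clamped box scan happens to write nothing).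
def Pre_inflate_occupancy (occ : List Int) (w : Int) (h_ : Int) (r_cells : Int) (occ_th : Int) : Prop :=
  r_cells ≤ 0 ∨
    (0 < w ∧ ∀ v ∈ occ.drop (w * h_).toNat, v ≠ 255) ∨
    (w = 0 ∧ ∀ v ∈ occ, v < occ_th ∧ v ≠ 255)

instance (occ : List Int) (w : Int) (h_ : Int) (r_cells : Int) (occ_th : Int) : Decidable (Pre_inflate_occupancy occ w h_ r_cells occ_th) := by unfold Pre_inflate_occupancy; infer_instance

def pvWitness_inflate_occupancy : List Int × Int × Int × Int × Int := ([100, 0, 0, 255], 2, 2, 1, 50)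

def Spec_inflate_occupancy (occ : List Int) (w : Int) (h_ : Int) (r_cells : Int) (occ_th : Int) (out : List Int) : Prop := out = inflate_occupancy_alt occ w h_ r_cells occ_th
instance (occ : List Int) (w : Int) (h_ : Int) (r_cells : Int) (occ_th : Int) (out : List Int) : Decidable (Spec_inflate_occupancy occ w h_ r_cells occ_th out) := by unfold Spec_inflate_occupancy; infer_instance

-- ===== CLAIM (what is proved, stated in full; the proofs are below) =====
def Claim_equal_inflate_occupancy : Prop := ∀ (occ : List Int) (w : Int) (h_ : Int) (r_cells : Int) (occ_th : Int), Dom_inflate_occupancy occ w h_ r_cells occ_th → Pre_inflate_occupancy occ w h_ r_cells occ_th → Spec_inflate_occupancy occ w h_ r_cells occ_th (inflate_occupancy occ w h_ r_cells occ_th)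

-- ===== LEMMAS AND PROOFS =====

def pvInv (l : List Int) : Prop := ∀ j : Nat, l.getD j 0 = 0 ∨ l.getD j 0 = 100

lemma pv_getD_set (l : List Int) (n k : Nat) (v : Int) :
    (l.set n v).getD k 0 = if n = k ∧ n < l.length then v else l.getD k 0 := by
  simp only [List.getD_eq_getElem?_getD, List.getElem?_set]
  split_ifs with h1 h2 <;> simp_all <;> omega

lemma pv_write_char (l : List Int) (i : Int) (hi : 0 ≤ i) (hInv : pvInv l) :
    (PySem.List.pySetD l i (max (PySem.List.pyGetD l i 0) 100)).length = l.length ∧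
    pvInv (PySem.List.pySetD l i (max (PySem.List.pyGetD l i 0) 100)) ∧
    ∀ k : Nat, k < l.length →
      (PySem.List.pySetD l i (max (PySem.List.pyGetD l i 0) 100)).getD k 0 =
        if i = (k : Int) then 100 else l.getD k 0 := by
  rw [PySem.List.pySetD_of_nonneg l _ hi]
  refine ⟨List.length_set .., ?_, ?_⟩
  · intro j
    rw [pv_getD_set]
    split_ifs with h
    · rcases h with ⟨rfl, hlt⟩
      have := PySem.List.pyGetD_eq_getElem (xs := l) (i := i) (d := 0) hi (by omega)
      rw [this]
      rcases hInv i.toNat with h0 | h0 <;> rw [List.getD_eq_getElem l 0 (by omega)] at h0 <;>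
        simp [h0]
    · exact hInv j
  · intro k hk
    rw [pv_getD_set]
    have hik : (i.toNat = k ∧ i.toNat < l.length) ↔ i = (k : Int) := by omega
    by_cases hc : i = (k : Int)
    · rw [if_pos (hik.mpr hc), if_pos hc]
      have hlt : i < (l.length : Int) := by omega
      rw [PySem.List.pyGetD_eq_getElem (xs := l) (d := 0) hi hlt]
      rcases hInv i.toNat with h0 | h0 <;> rw [List.getD_eq_getElem l 0 (by omega)] at h0 <;>
        simp [h0]
    · rw [if_neg (fun hh => hc (hik.mp hh)), if_neg hc]

lemma pv_markFold {α : Type} (xs : List α) (step : List Int → α → List Int) (c : α → Nat → Bool)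
    (hstep : ∀ l a, a ∈ xs → pvInv l →
      (step l a).length = l.length ∧ pvInv (step l a) ∧
      ∀ k : Nat, k < l.length → (step l a).getD k 0 = if c a k then 100 else l.getD k 0) :
    ∀ l, pvInv l →
      (xs.foldl step l).length = l.length ∧ pvInv (xs.foldl step l) ∧
      ∀ k : Nat, k < l.length →
        (xs.foldl step l).getD k 0 = if xs.any (fun a => c a k) then 100 else l.getD k 0 := by
  induction xs with
  | nil => intro l hInv; simp [hInv]
  | cons a t ih =>
    intro l hInv
    obtain ⟨hlen, hInv', hchar⟩ := hstep l a (List.mem_cons_self ..) hInv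
    obtain ⟨hlen2, hInv2, hchar2⟩ :=
      ih (fun l b hb hi => hstep l b (List.mem_cons_of_mem a hb) hi) (step l a) hInv'
    refine ⟨by simp [List.foldl_cons, hlen2, hlen], by simpa [List.foldl_cons] using hInv2, ?_⟩
    intro k hk
    rw [List.foldl_cons, hchar2 k (by omega), hchar k hk, List.any_cons]
    by_cases h1 : c a k <;> by_cases h2 : t.any (fun b => c b k) <;> simp [h1, h2]

lemma pv_overlay_length (occ : List Int) (s : Int) (l : List Int) :
    ((PySem.List.enumerate occ s).foldl (fun infl iv =>
      if iv.2 = 255 then PySem.List.pySetD infl iv.1 255 else infl) l).length = l.length := by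
  induction occ generalizing s l with
  | nil => simp [PySem.List.enumerate]
  | cons v t ih =>
    rw [PySem.List.enumerate_cons, List.foldl_cons]
    rw [ih]
    split_ifs
    · exact PySem.List.length_pySetD ..
    · rfl

lemma pv_overlay_getD (occ : List Int) (s : Nat) (l : List Int) (k : Nat) (hk : k < l.length) :
    ((PySem.List.enumerate occ (s : Int)).foldl (fun infl iv =>
      if iv.2 = 255 then PySem.List.pySetD infl iv.1 255 else infl) l).getD k 0 =
      if s ≤ k ∧ k - s < occ.length ∧ occ.getD (k - s) 0 = 255 then 255 else l.getD k 0 := by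
  induction occ generalizing s l with
  | nil => simp [PySem.List.enumerate]
  | cons v t ih =>
    rw [PySem.List.enumerate_cons, List.foldl_cons]
    have hstep : (if ((s : Int), v).2 = 255 then PySem.List.pySetD l ((s : Int), v).1 255 else l) =
        if v = 255 then PySem.List.pySetD l (s : Int) 255 else l := rfl
    rw [hstep]
    have hcast : (s : Int) + 1 = ((s + 1 : Nat) : Int) := by push_cast; ring
    have hl'len : (if v = 255 then PySem.List.pySetD l (s : Int) 255 else l).length = l.length := by
      split_ifs <;> simp [PySem.List.length_pySetD]
    rw [hcast, ih (s + 1) _ (by omega)]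
    have hgl' : (if v = 255 then PySem.List.pySetD l (s : Int) 255 else l).getD k 0 =
        if s = k ∧ v = 255 then 255 else l.getD k 0 := by
      by_cases hv : v = 255 <;> by_cases hsk : s = k
      · subst hsk
        rw [if_pos hv, if_pos ⟨rfl, hv⟩, PySem.List.pySetD_natCast, pv_getD_set, if_pos ⟨rfl, hk⟩]
      · rw [if_pos hv, if_neg (by tauto), PySem.List.pySetD_natCast, pv_getD_set, if_neg (by omega)]
      · rw [if_neg hv, if_neg (by tauto)]
      · rw [if_neg hv, if_neg (by tauto)]
    rw [hgl']
    by_cases hsk : s = k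
    · subst hsk
      rw [if_neg (by omega)]
      by_cases hv : v = 255
      · rw [if_pos ⟨rfl, hv⟩, if_pos ⟨le_refl s, by simp, by simpa using hv⟩]
      · rw [if_neg (by tauto), if_neg (by rintro ⟨-, -, h3⟩; simp at h3; exact hv h3)]
    · have hinner : (if s = k ∧ v = 255 then (255 : Int) else l.getD k 0) = l.getD k 0 :=
        if_neg (by tauto)
      rw [hinner]
      by_cases hc : s + 1 ≤ k ∧ k - (s + 1) < t.length ∧ t.getD (k - (s + 1)) 0 = 255
      · rw [if_pos hc, if_pos]
        obtain ⟨h1, h2, h3⟩ := hc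
        refine ⟨by omega, by simp; omega, ?_⟩
        rw [show k - s = (k - (s + 1)) + 1 by omega, List.getD_cons_succ]
        exact h3
      · rw [if_neg hc, if_neg]
        rintro ⟨h1, h2, h3⟩
        have hs1 : s + 1 ≤ k := by omega
        rw [show k - s = (k - (s + 1)) + 1 by omega, List.getD_cons_succ] at h3
        exact hc ⟨hs1, by simp at h2; omega, h3⟩

lemma pv_box_eq_circle (w h_ r_cells : Int) (hw : 0 < w) (hr : 0 < r_cells) (ox oy : Int) (k : Nat)
    (hkL : (k : Int) < w * h_) :
    ((PySem.List.pyRange (max 0 (oy - r_cells)) (min (h_ - 1) (oy + r_cells) + 1) 1).any (fun y =>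
      (PySem.List.pyRange (max 0 (ox - r_cells)) (min (w - 1) (ox + r_cells) + 1) 1).any (fun x =>
        decide ((x - ox) * (x - ox) + (y - oy) * (y - oy) ≤ r_cells * r_cells) &&
          (y * w + x == (k : Int))))) =
    decide (((k : Int) % w - ox) ^ 2 + ((k : Int) / w - oy) ^ 2 ≤ r_cells * r_cells) := by
  rw [Bool.eq_iff_iff]
  simp only [List.any_eq_true, PySem.List.mem_pyRange_one, Bool.and_eq_true, decide_eq_true_eq,
    beq_iff_eq]
  constructor
  · rintro ⟨y, ⟨hy1, hy2⟩, x, ⟨hx1, hx2⟩, hcond, hidx⟩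
    have hx0 : 0 ≤ x := by omega
    have hxw : x < w := by omega
    have hy0 : 0 ≤ y := by omega
    have hmod : (k : Int) % w = x := by
      rw [← hidx, show y * w + x = x + y * w by ring, Int.add_mul_emod_self_right,
        Int.emod_eq_of_lt hx0 hxw]
    have hdiv : (k : Int) / w = y := by
      rw [← hidx]
      rw [show y * w + x = x + y * w by ring, Int.add_mul_ediv_right _ _ (by omega : w ≠ 0),
        Int.ediv_eq_zero_of_lt hx0 hxw, zero_add]
    rw [hmod, hdiv, pow_two, pow_two]
    exact hcond
  · intro hcirc
    have hk0 : (0 : Int) ≤ (k : Int) := Int.natCast_nonneg k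
    have hx0 : 0 ≤ (k : Int) % w := Int.emod_nonneg _ (by omega)
    have hxw : (k : Int) % w < w := Int.emod_lt_of_pos _ hw
    have hy0 : 0 ≤ (k : Int) / w := Int.ediv_nonneg hk0 (le_of_lt hw)
    have hyh : (k : Int) / w < h_ := by
      rw [Int.ediv_lt_iff_lt_mul hw]
      linarith [hkL]
    have hsq1 : ((k : Int) % w - ox) * ((k : Int) % w - ox) + ((k : Int) / w - oy) * ((k : Int) / w - oy) ≤ r_cells * r_cells := by
      nlinarith [hcirc]
    have hbx : -(r_cells) ≤ (k : Int) % w - ox ∧ (k : Int) % w - ox ≤ r_cells := by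
      constructor <;> nlinarith [hsq1, mul_self_nonneg ((k : Int) / w - oy)]
    have hby : -(r_cells) ≤ (k : Int) / w - oy ∧ (k : Int) / w - oy ≤ r_cells := by
      constructor <;> nlinarith [hsq1, mul_self_nonneg ((k : Int) % w - ox)]
    have hdm := Int.emod_add_mul_ediv (k : Int) w
    refine ⟨(k : Int) / w, ⟨by omega, by omega⟩, (k : Int) % w, ⟨by omega, by omega⟩, hsq1, ?_⟩
    nlinarith [hdm]


lemma pv_overlay_getD0 (occ l : List Int) (k : Nat) (hk : k < l.length) :
    ((PySem.List.enumerate occ 0).foldl (fun infl iv =>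
      if iv.2 = 255 then PySem.List.pySetD infl iv.1 255 else infl) l).getD k 0 =
      if k < occ.length ∧ occ.getD k 0 = 255 then 255 else l.getD k 0 := by
  have h := pv_overlay_getD occ 0 l k hk
  rw [Nat.cast_zero] at h
  rw [h]
  simp

lemma pv_main (occ : List Int) (w h_ r_cells occ_th : Int) (hw : 0 ≤ w) (hr : ¬ r_cells ≤ 0) :
    inflate_occupancy occ w h_ r_cells occ_th = inflate_occupancy_alt occ w h_ r_cells occ_th := by
  have hr' : 0 < r_cells := by omega
  simp only [inflate_occupancy, inflate_occupancy_alt, if_neg hr]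
  set S := List.map (fun iv => (PySem.Int.mod iv.1 w, PySem.Int.floordiv iv.1 w))
      (List.filter (fun iv => decide (occ_th ≤ iv.2) && decide (iv.2 ≠ 255))
        (PySem.List.enumerate occ)) with hS
  have hrep : pvInv (List.replicate (w * h_).toNat (0 : Int)) := by
    intro j
    left
    simp [List.getD_eq_getElem?_getD, List.getElem?_replicate]
    split_ifs <;> rfl
  have hmain := pv_markFold S
    (fun infl oc =>
      List.foldl
        (fun infl y =>
          List.foldl
            (fun infl x =>
              if (x - oc.1) * (x - oc.1) + (y - oc.2) * (y - oc.2) ≤ r_cells * r_cells then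
                PySem.List.pySetD infl (y * w + x) (max (PySem.List.pyGetD infl (y * w + x) 0) 100)
              else infl)
            infl (PySem.List.pyRange (max 0 (oc.1 - r_cells)) (min (w - 1) (oc.1 + r_cells) + 1)))
        infl (PySem.List.pyRange (max 0 (oc.2 - r_cells)) (min (h_ - 1) (oc.2 + r_cells) + 1)))
    (fun oc k =>
      (PySem.List.pyRange (max 0 (oc.2 - r_cells)) (min (h_ - 1) (oc.2 + r_cells) + 1)).any fun y =>
        (PySem.List.pyRange (max 0 (oc.1 - r_cells)) (min (w - 1) (oc.1 + r_cells) + 1)).any fun x =>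
          decide ((x - oc.1) * (x - oc.1) + (y - oc.2) * (y - oc.2) ≤ r_cells * r_cells) &&
            (y * w + x == (k : Int)))
    (by
      intro l oc hoc hInv
      refine pv_markFold _ _ _ ?_ l hInv
      intro l' y hy hInv'
      refine pv_markFold _ _ (fun x k =>
          decide ((x - oc.1) * (x - oc.1) + (y - oc.2) * (y - oc.2) ≤ r_cells * r_cells) &&
            (y * w + x == (k : Int))) ?_ l' hInv'
      intro l'' x hx hInv''
      by_cases hc : (x - oc.1) * (x - oc.1) + (y - oc.2) * (y - oc.2) ≤ r_cells * r_cells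
      · have hynn : 0 ≤ y := by
          have := PySem.List.mem_pyRange_one.mp hy
          omega
        have hxnn : 0 ≤ x := by
          have := PySem.List.mem_pyRange_one.mp hx
          omega
        have hi : 0 ≤ y * w + x := by
          have := mul_nonneg hynn hw
          omega
        obtain ⟨e1, e2, e3⟩ := pv_write_char l'' (y * w + x) hi hInv''
        refine ⟨by simpa [if_pos hc] using e1, by simpa [if_pos hc] using e2, ?_⟩
        intro k hk
        simp only [if_pos hc, decide_eq_true hc, Bool.true_and]
        rw [e3 k hk]
        by_cases hek : y * w + x = (k : Int)
        · simp [hek]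
        · simp [hek, if_neg hek]
      · refine ⟨by simp [if_neg hc], by simpa [if_neg hc] using hInv'', ?_⟩
        intro k hk
        simp [if_neg hc, decide_eq_false hc])
    (List.replicate (w * h_).toNat 0) hrep
  obtain ⟨hAlen, -, hAchar⟩ := hmain
  apply List.ext_getElem
  · rw [pv_overlay_length, hAlen]
    simp [PySem.List.length_pyRange_one]
  · intro k hk1 hk2
    have hlen1 := hk1
    rw [pv_overlay_length] at hlen1
    have hkL : k < (w * h_).toNat := by
      rw [hAlen, List.length_replicate] at hlen1
      exact hlen1
    have hwpos : 0 < w := by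
      rcases lt_or_eq_of_le hw with h | h
      · exact h
      · exfalso
        rw [← h] at hkL
        simp at hkL
    have hkInt : (k : Int) < w * h_ := by omega
    rw [← List.getD_eq_getElem _ 0 hk1, ← List.getD_eq_getElem _ 0 hk2]
    rw [pv_overlay_getD0 _ _ k hlen1, hAchar k (by simpa using hkL)]
    have hrhs : (List.map (fun i =>
        if i < (occ.length : Int) ∧ PySem.List.pyGet? occ i = some 255 then (255 : Int)
        else if (S.any fun s =>
            decide ((PySem.Int.mod i w - s.1) ^ 2 + (PySem.Int.floordiv i w - s.2) ^ 2 ≤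
              r_cells * r_cells)) = true then 100 else 0)
        (PySem.List.pyRange 0 (w * h_))).getD k 0 =
        (if (k : Int) < (occ.length : Int) ∧ PySem.List.pyGet? occ (k : Int) = some 255 then (255 : Int)
        else if (S.any fun s =>
            decide ((PySem.Int.mod (k : Int) w - s.1) ^ 2 + (PySem.Int.floordiv (k : Int) w - s.2) ^ 2 ≤
              r_cells * r_cells)) = true then 100 else 0) := by
      rw [List.getD_eq_getElem _ 0 hk2, List.getElem_map, PySem.List.getElem_pyRange_one, zero_add]
    rw [hrhs]
    have hc1 : ((k : Int) < (occ.length : Int) ∧ PySem.List.pyGet? occ (k : Int) = some 255) ↔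
        (k < occ.length ∧ occ.getD k 0 = 255) := by
      rw [PySem.List.pyGet?_natCast]
      constructor
      · rintro ⟨h1, h2⟩
        obtain ⟨hlt, he⟩ := List.getElem?_eq_some_iff.mp h2
        exact ⟨by omega, by rw [List.getD_eq_getElem _ 0 hlt]; exact he⟩
      · rintro ⟨h1, h2⟩
        refine ⟨by omega, List.getElem?_eq_some_iff.mpr ⟨h1, ?_⟩⟩
        rw [← List.getD_eq_getElem _ 0 h1]
        exact h2
    have hc2 : (S.any fun oc =>
        (PySem.List.pyRange (max 0 (oc.2 - r_cells)) (min (h_ - 1) (oc.2 + r_cells) + 1)).any fun y =>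
          (PySem.List.pyRange (max 0 (oc.1 - r_cells)) (min (w - 1) (oc.1 + r_cells) + 1)).any fun x =>
            decide ((x - oc.1) * (x - oc.1) + (y - oc.2) * (y - oc.2) ≤ r_cells * r_cells) &&
              (y * w + x == (k : Int))) =
        (S.any fun s =>
          decide ((PySem.Int.mod (k : Int) w - s.1) ^ 2 + (PySem.Int.floordiv (k : Int) w - s.2) ^ 2 ≤
            r_cells * r_cells)) := by
      refine List.any_congr rfl fun oc => ?_
      rw [pv_box_eq_circle w h_ r_cells hwpos hr' oc.1 oc.2 k hkInt]
      rw [PySem.Int.mod_eq_emod_of_pos hwpos, PySem.Int.floordiv_eq_ediv_of_pos hwpos]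
    rw [hc2]
    have hz : (List.replicate (w * h_).toNat (0 : Int)).getD k 0 = 0 := by
      simp [List.getD_eq_getElem?_getD, List.getElem?_replicate]
      split_ifs <;> rfl
    rw [hz]
    by_cases hb : k < occ.length ∧ occ.getD k 0 = 255
    · rw [if_pos hb, if_pos (hc1.mpr hb)]
    · rw [if_neg hb, if_neg (fun hh => hb (hc1.mp hh))]

-- ===== VERDICT (by name: the statement is the Claim_ definition above) =====
theorem inflate_occupancy_spec : Claim_equal_inflate_occupancy := by
  intro occ w h_ r_cells occ_th hdom hpre
  show inflate_occupancy occ w h_ r_cells occ_th = inflate_occupancy_alt occ w h_ r_cells occ_th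
  by_cases hr : r_cells ≤ 0
  · simp [inflate_occupancy, inflate_occupancy_alt, if_pos hr]
  · have hw : 0 ≤ w := by
      rcases hpre with h | ⟨h, -⟩ | ⟨h, -⟩ <;> omega
    exact pv_main occ w h_ r_cells occ_th hw hr
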